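-- pv_equiv track=rewrite | github.com/Davijluna/Restaurant-Orders | src/analyze_log.py | func_quantid_never
-- ===== SOURCE A (Python) =====
-- def func_quantid_never(client, orders):
--     all_food = set()
--     ordered_fod = set()
--
--     for customer, dish, _ in orders:
--         all_food.add(dish)
--
--     for customer, dish, _ in orders:
--         if customer == client:
--             ordered_fod.add(dish)
--
--     return all_food - ordered_fod
-- ===== SOURCE B (Python) =====
-- def func_quantid_never(client, orders):
--     dish_customers = {}
--     for customer, dish, _ in orders:
--         dish_customers.setdefault(dish, []).append(customer)
--     result = set()
--     for dish, customers in dish_customers.items():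
--         if client not in customers:
--             result.add(dish)
--     return result
-- ===== Notes on version B (the rewrite author's own statement) =====
-- stated objective: alternative
-- what changed: Replaces A's two whole-orders passes building an all-dishes set and a client-ordered set and subtracting them with a single grouping pass building a dish-to-customers index, then one filtering pass over the index keeping dishes whose customer list lacks the client.
import Mathlib
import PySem

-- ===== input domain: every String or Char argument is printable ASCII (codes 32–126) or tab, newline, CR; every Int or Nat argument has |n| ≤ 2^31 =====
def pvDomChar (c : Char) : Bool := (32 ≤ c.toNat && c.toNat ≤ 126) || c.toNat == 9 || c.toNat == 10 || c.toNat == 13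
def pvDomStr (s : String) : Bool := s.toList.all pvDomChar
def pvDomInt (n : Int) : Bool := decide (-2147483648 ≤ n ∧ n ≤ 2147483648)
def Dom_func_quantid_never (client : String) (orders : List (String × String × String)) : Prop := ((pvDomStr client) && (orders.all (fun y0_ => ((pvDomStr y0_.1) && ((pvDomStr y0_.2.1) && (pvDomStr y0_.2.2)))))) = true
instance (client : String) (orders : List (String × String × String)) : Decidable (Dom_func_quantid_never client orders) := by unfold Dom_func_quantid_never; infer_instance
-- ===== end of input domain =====

-- B replaces A's two-set-difference with a single dish→customers grouping index and one
-- filtering pass over it (objective: alternative; same asymptotic cost).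


-- ===== PORT A =====
def func_quantid_never (client : String) (orders : List (String × String × String)) : List String :=
  let all_food : PySem.Set String :=
    orders.foldl (fun s o => PySem.Set.add s o.2.1) PySem.Set.empty
  let ordered_fod : PySem.Set String :=
    orders.foldl (fun s o => if o.1 == client then PySem.Set.add s o.2.1 else s) PySem.Set.empty
  PySem.Set.diff all_food ordered_fod

-- ===== PORT B =====
def func_quantid_never_alt (client : String) (orders : List (String × String × String)) : List String :=
  let dish_customers : PySem.Dict String (List String) :=
    orders.foldl (fun d o => d.modify o.2.1 [] (fun cs => cs ++ [o.1])) PySem.Dict.empty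
  dish_customers.items.foldl
    (fun r p => if !(p.2.contains client) then PySem.Set.add r p.1 else r)
    PySem.Set.empty

-- ===== PRECONDITION & SPEC =====
def Spec_func_quantid_never (client : String) (orders : List (String × String × String)) (out : List String) : Prop := out = func_quantid_never_alt client orders
instance (client : String) (orders : List (String × String × String)) (out : List String) : Decidable (Spec_func_quantid_never client orders out) := by unfold Spec_func_quantid_never; infer_instance

-- ===== CLAIM (what is proved, stated in full; the proofs are below) =====
def Claim_equal_func_quantid_never : Prop := ∀ (client : String) (orders : List (String × String × String)), Dom_func_quantid_never client orders → Spec_func_quantid_never client orders (func_quantid_never client orders)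

-- ===== LEMMAS AND PROOFS =====

-- customers recorded for a dish c = the first components of the orders whose dish is c
theorem getD_customers_loop (orders : List (String × String × String))
    (d : PySem.Dict String (List String)) (c : String) :
    (orders.foldl (fun d o => d.modify o.2.1 [] (fun cs => cs ++ [o.1])) d).getD c []
      = d.getD c [] ++ (orders.filter (fun o => o.2.1 == c)).map (·.1) := by
  induction orders generalizing d with
  | nil => simp
  | cons o rest ih =>
    simp only [List.foldl_cons, ih, List.filter_cons]
    by_cases h : o.2.1 = c
    · subst h; simp [PySem.Dict.getD_modify_self]
    · rw [PySem.Dict.getD_modify_of_ne _ _ _ (Ne.symm h)]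
      simp [h]

-- membership in A's second-loop set
theorem mem_ordered_loop (client : String) (orders : List (String × String × String))
    (s : PySem.Set String) (x : String) :
    (x ∈ orders.foldl (fun s o => if o.1 == client then PySem.Set.add s o.2.1 else s) s)
      ↔ x ∈ s ∨ ∃ o ∈ orders, o.1 = client ∧ o.2.1 = x := by
  induction orders generalizing s with
  | nil => simp
  | cons o rest ih =>
    simp only [List.foldl_cons]
    by_cases h : o.1 = client
    · simp only [h, BEq.rfl, if_true, ih, PySem.Set.mem_add, List.mem_cons]
      constructor
      · rintro (⟨hs | hx⟩ | hex)
        · exact Or.inl hs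
        · exact Or.inr ⟨o, Or.inl rfl, h, hx.symm⟩
        · obtain ⟨o', ho', hc, hd⟩ := hex; exact Or.inr ⟨o', Or.inr ho', hc, hd⟩
      · rintro (hs | ⟨o', (rfl | ho'), hc, hd⟩)
        · exact Or.inl (Or.inl hs)
        · exact Or.inl (Or.inr hd.symm)
        · exact Or.inr ⟨o', ho', hc, hd⟩
    · have : (o.1 == client) = false := by simp [h]
      simp only [this, ih, List.mem_cons]
      constructor
      · rintro (hs | ⟨o', ho', hc, hd⟩)
        · exact Or.inl hs
        · exact Or.inr ⟨o', Or.inr ho', hc, hd⟩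
      · rintro (hs | ⟨o', (rfl | ho'), hc, hd⟩)
        · exact Or.inl hs
        · exact absurd hc h
        · exact Or.inr ⟨o', ho', hc, hd⟩

-- a conditional Set.add loop from fresh elements is a filter
theorem foldl_add_filter (p : String → Bool) (l : List String) (r : PySem.Set String)
    (hnd : l.Nodup) (hfresh : ∀ k ∈ l, k ∉ r) :
    l.foldl (fun r k => if p k then PySem.Set.add r k else r) r = r ++ l.filter p := by
  induction l generalizing r with
  | nil => simp
  | cons k rest ih =>
    simp only [List.foldl_cons, List.filter_cons]
    rcases List.nodup_cons.mp hnd with ⟨hk, hrest⟩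
    by_cases hp : p k
    · rw [if_pos hp, if_pos hp,
        PySem.Set.add_of_not_mem (hfresh k (List.mem_cons_self)),
        ih _ hrest (fun k' hk' => by
          simp only [List.mem_append, List.mem_singleton]
          rintro (hr | rfl)
          · exact hfresh k' (List.mem_cons_of_mem _ hk') hr
          · exact hk hk')]
      simp
    · rw [if_neg (by simp [hp]), if_neg (by simp [hp]),
        ih _ hrest (fun k' hk' => hfresh k' (List.mem_cons_of_mem _ hk'))]

theorem func_quantid_never_eq (client : String) (orders : List (String × String × String)) :
    func_quantid_never client orders = func_quantid_never_alt client orders := by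
  unfold func_quantid_never func_quantid_never_alt
  simp only []
  set dc := orders.foldl (fun d o => d.modify o.2.1 [] (fun cs => cs ++ [o.1]))
    PySem.Dict.empty with hdc
  have hkeys : dc.keys = PySem.Set.ofList (orders.map (·.2.1)) := by
    rw [hdc, PySem.Dict.keys_foldl_modify_key orders (fun o => o.2.1) []
      (fun _ o cs => cs ++ [o.1]) PySem.Dict.empty]
    simp [PySem.Set.update_nil_left, PySem.Dict.empty]
  have hnodup : dc.keys.Nodup := by
    rw [hkeys]; exact PySem.Set.nodup_ofList _
  have hall : orders.foldl (fun s o => PySem.Set.add s o.2.1) PySem.Set.empty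
      = PySem.Set.ofList (orders.map (·.2.1)) := by
    rw [← PySem.Set.update_map_eq_foldl_add]
    simp [PySem.Set.update_nil_left]
  rw [PySem.Dict.items_eq_map_keys dc hnodup [], List.foldl_map, hall, hkeys]
  rw [foldl_add_filter _ _ _ (PySem.Set.nodup_ofList _) (by simp [PySem.Set.empty])]
  show PySem.Set.diff _ _ = _
  unfold PySem.Set.diff
  simp only [PySem.Set.empty, List.nil_append]
  apply List.filter_congr
  intro x hx
  congr 1
  simp only [PySem.Set.contains_eq_listContains, List.contains_eq_mem, decide_eq_decide]
  rw [mem_ordered_loop, hdc, getD_customers_loop]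
  simp only [PySem.Dict.getD_empty, List.nil_append, List.mem_map, List.mem_filter,
    List.not_mem_nil, false_or, beq_iff_eq]
  constructor
  · rintro ⟨o, ho, hc, hd⟩; exact ⟨o, ⟨ho, hd⟩, hc⟩
  · rintro ⟨o, ⟨ho, hd⟩, hc⟩; exact ⟨o, ho, hc, hd⟩

-- ===== VERDICT (by name: the statement is the Claim_ definition above) =====
theorem func_quantid_never_spec : Claim_equal_func_quantid_never := by
  intro client orders _
  unfold Spec_func_quantid_never
  exact func_quantid_never_eq client orders
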